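-- pv_equiv track=rewrite | github.com/niloufarnaeeni/attention-economy-team | graph_retrieval/tools/yaps_metrics.py | expand_metric_names
-- ===== SOURCE A (Python) =====
-- from typing import Dict, List, Tuple, Optional
--
-- def expand_metric_names(ks: List[int]) -> List[str]:
--     m = []
--     for k in ks:
--         m.append(f"P_{k}")
--     for k in ks:
--         m.append(f"recall_{k}")
--     for k in ks:
--         m.append(f"ndcg_cut_{k}")
--     for k in ks:
--         m.append(f"map_cut_{k}")
--     return m
-- ===== SOURCE B (Python) =====
-- from typing import List
--
-- def expand_metric_names(ks: List[int]) -> List[str]: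
--     prefixes = ["P_", "recall_", "ndcg_cut_", "map_cut_"]
--     n = len(ks)
--     return [prefixes[i // n] + str(ks[i % n]) for i in range(4 * n)]
-- ===== Notes on version B (the rewrite author's own statement) =====
-- stated objective: alternative
-- what changed: Replaced four sequential append passes with one flat comprehension over range(4*len(ks)) that computes each element positionally by index arithmetic: prefixes[i // n] + str(ks[i % n]).
import Mathlib
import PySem

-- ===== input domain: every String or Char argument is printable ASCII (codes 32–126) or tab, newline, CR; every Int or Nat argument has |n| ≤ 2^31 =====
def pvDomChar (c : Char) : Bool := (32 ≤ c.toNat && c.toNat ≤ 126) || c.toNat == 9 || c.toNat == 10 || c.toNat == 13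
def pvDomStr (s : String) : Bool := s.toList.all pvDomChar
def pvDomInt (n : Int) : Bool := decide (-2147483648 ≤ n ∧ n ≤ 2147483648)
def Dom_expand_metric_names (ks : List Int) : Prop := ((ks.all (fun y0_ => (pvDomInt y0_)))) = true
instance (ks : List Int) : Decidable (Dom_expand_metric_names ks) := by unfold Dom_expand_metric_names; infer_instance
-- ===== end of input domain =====

-- ===== PORT A =====
-- A: four sequential append passes, one per metric family.
-- B: one flat indexed comprehension over range(4*n): element i is
-- prefixes[i // n] + str(ks[i % n]).  Objective: alternative (positional
-- closed-form construction instead of staged passes); same cost.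
def expand_metric_names (ks : List Int) : List String :=
  let m := []
  let m := ks.foldl (fun m k => m ++ ["P_" ++ PySem.Int.toStr k]) m
  let m := ks.foldl (fun m k => m ++ ["recall_" ++ PySem.Int.toStr k]) m
  let m := ks.foldl (fun m k => m ++ ["ndcg_cut_" ++ PySem.Int.toStr k]) m
  let m := ks.foldl (fun m k => m ++ ["map_cut_" ++ PySem.Int.toStr k]) m
  m

-- ===== PORT B =====
-- prefixes[i // n] and ks[i % n]: the indices are always in range for
-- i ∈ range(4*n) (proved below), so pyGetD's default is never used.
def expand_metric_names_alt (ks : List Int) : List String :=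
  let prefixes := ["P_", "recall_", "ndcg_cut_", "map_cut_"]
  let n : Int := ks.length
  (PySem.List.pyRange 0 (4 * n) 1).map (fun i =>
    PySem.List.pyGetD prefixes (PySem.Int.floordiv i n) ""
      ++ PySem.Int.toStr (PySem.List.pyGetD ks (PySem.Int.mod i n) 0))

-- ===== PRECONDITION & SPEC =====
def Spec_expand_metric_names (ks : List Int) (out : List String) : Prop := out = expand_metric_names_alt ks
instance (ks : List Int) (out : List String) : Decidable (Spec_expand_metric_names ks out) := by unfold Spec_expand_metric_names; infer_instance

-- ===== CLAIM =====
def Claim_equal_expand_metric_names : Prop := ∀ (ks : List Int), Dom_expand_metric_names ks → Spec_expand_metric_names ks (expand_metric_names ks)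

-- ===== LEMMAS AND PROOFS =====
theorem foldl_append_map (ks : List Int) (f : Int → String) (acc : List String) :
    ks.foldl (fun m k => m ++ [f k]) acc = acc ++ ks.map f := by
  induction ks generalizing acc with
  | nil => simp
  | cons k ks ih => simp [List.foldl, ih]

-- one n-sized chunk of B's flat comprehension is one of A's passes
theorem chunk_eq (ks : List Int) (o j : Nat) (ho : o = j * ks.length) (p : String)
    (hp : (["P_", "recall_", "ndcg_cut_", "map_cut_"] : List String).getD j "" = p) :
    (List.range ks.length).map (fun i =>
      PySem.List.pyGetD ["P_", "recall_", "ndcg_cut_", "map_cut_"]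
          (PySem.Int.floordiv ((o + i : Nat) : Int) (ks.length : Int)) ""
        ++ PySem.Int.toStr
            (PySem.List.pyGetD ks (PySem.Int.mod ((o + i : Nat) : Int) (ks.length : Int)) 0))
      = ks.map (fun k => p ++ PySem.Int.toStr k) := by
  apply List.ext_getElem
  · simp
  · intro i h1 h2
    simp only [List.getElem_map, List.getElem_range]
    have hlen : i < ks.length := by simpa using h1
    have hdiv : (o + i) / ks.length = j := by
      subst ho
      rw [Nat.add_comm, Nat.add_mul_div_right _ _ (by omega : 0 < ks.length),
        Nat.div_eq_of_lt hlen]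
      omega
    have hmod : (o + i) % ks.length = i := by
      subst ho
      rw [Nat.add_comm, Nat.add_mul_mod_self_right, Nat.mod_eq_of_lt hlen]
    rw [PySem.Int.floordiv_natCast, PySem.Int.mod_natCast, hdiv, hmod]
    rw [PySem.List.pyGetD_natCast, PySem.List.pyGetD_natCast, hp]
    simp [List.getD_eq_getElem?_getD, List.getElem?_eq_getElem hlen]

-- ===== VERDICT =====
theorem expand_metric_names_spec : Claim_equal_expand_metric_names := by
  intro ks _
  unfold Spec_expand_metric_names expand_metric_names expand_metric_names_alt
  simp only [foldl_append_map, List.nil_append]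
  have h4 : (4 * (ks.length : Int)) = ((4 * ks.length : Nat) : Int) := by push_cast; ring
  rw [h4, PySem.List.pyRange_zero_nat, List.map_map]
  have hsplit : 4 * ks.length = ks.length + ks.length + ks.length + ks.length := by ring
  rw [hsplit, List.range_add, List.range_add, List.range_add,
    List.map_append, List.map_append, List.map_append, List.map_map, List.map_map, List.map_map]
  simp only [Function.comp_def]
  have h0 := chunk_eq ks 0 0 (by ring) "P_" rfl
  simp only [Nat.zero_add] at h0
  rw [h0, chunk_eq ks ks.length 1 (by ring) "recall_" rfl,
      chunk_eq ks (ks.length + ks.length) 2 (by ring) "ndcg_cut_" rfl,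
      chunk_eq ks (ks.length + ks.length + ks.length) 3 (by ring) "map_cut_" rfl]
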